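-- pv_equiv track=rewrite | github.com/ibonelli/muvolman | string_format.py | fillstr
-- ===== SOURCE A (Python) =====
-- def fillstr(maxsize,string):
--   mystr = string
--   if(len(string) < maxsize):
--     strfill = maxsize - len(string)
--     while strfill > 0:
--       mystr += ' '
--       strfill -= 1
--   else:
--     mystr = string[0:maxsize]
--   return mystr
-- ===== SOURCE B (Python) =====
-- def fillstr(maxsize, string):
--     return (string + ' ' * (maxsize - len(string)))[:maxsize]
-- ===== Notes on version B (the rewrite author's own statement) =====
-- stated objective: simpler
-- what changed: Replaced the branch plus space-appending while-loop with a single closed-form expression: pad with ' ' * (maxsize - len) (empty when non-positive) and slice to maxsize.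
import Mathlib
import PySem

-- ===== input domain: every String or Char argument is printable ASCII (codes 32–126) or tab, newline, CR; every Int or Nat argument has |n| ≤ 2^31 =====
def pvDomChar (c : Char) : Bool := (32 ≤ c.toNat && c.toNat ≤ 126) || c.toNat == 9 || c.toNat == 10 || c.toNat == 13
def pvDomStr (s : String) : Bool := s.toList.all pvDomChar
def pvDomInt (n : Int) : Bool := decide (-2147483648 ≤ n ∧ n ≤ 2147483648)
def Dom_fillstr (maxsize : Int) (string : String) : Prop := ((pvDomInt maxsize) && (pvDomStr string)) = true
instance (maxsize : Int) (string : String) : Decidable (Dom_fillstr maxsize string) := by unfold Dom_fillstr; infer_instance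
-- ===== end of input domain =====

-- B: single closed-form pad-and-slice expression instead of A's branch plus while-loop (objective: simpler)
-- ===== PORT A =====
def fillstrLoop (mystr : List Char) (strfill : Int) : List Char :=
  if 0 < strfill then fillstrLoop (mystr ++ [' ']) (strfill - 1) else mystr
termination_by strfill.toNat
decreasing_by omega

def fillstr (maxsize : Int) (string : String) : String :=
  let mystr := string.toList
  if (string.toList.length : Int) < maxsize then
    String.ofList (fillstrLoop mystr (maxsize - (string.toList.length : Int)))
  else
    String.ofList (PySem.List.slice string.toList (some 0) (some maxsize))

-- ===== PORT B =====
def fillstr_alt (maxsize : Int) (string : String) : String :=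
  String.ofList (PySem.List.slice
    (string.toList ++ List.replicate (maxsize - (string.toList.length : Int)).toNat ' ')
    (some 0) (some maxsize))

-- ===== PRECONDITION & SPEC =====
def Spec_fillstr (maxsize : Int) (string : String) (out : String) : Prop := out = fillstr_alt maxsize string
instance (maxsize : Int) (string : String) (out : String) : Decidable (Spec_fillstr maxsize string out) := by unfold Spec_fillstr; infer_instance

-- ===== CLAIM (what is proved, stated in full; the proofs are below) =====
def Claim_equal_fillstr : Prop := ∀ (maxsize : Int) (string : String), Dom_fillstr maxsize string → Spec_fillstr maxsize string (fillstr maxsize string)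

-- ===== LEMMAS AND PROOFS =====

-- ===== VERDICT (by name: the statement is the Claim_ definition above) =====
theorem fillstrLoop_eq (k : Nat) : ∀ (xs : List Char) (n : Int), n.toNat = k →
    fillstrLoop xs n = xs ++ List.replicate k ' ' := by
  induction k with
  | zero =>
    intro xs n h
    unfold fillstrLoop
    rw [if_neg (by omega)]
    simp
  | succ k ih =>
    intro xs n h
    unfold fillstrLoop
    rw [if_pos (by omega)]
    rw [ih (xs ++ [' ']) (n - 1) (by omega)]
    simp [List.replicate_succ]

theorem fillstr_spec : Claim_equal_fillstr := by
  intro maxsize string _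
  unfold Spec_fillstr fillstr fillstr_alt
  by_cases h : (string.toList.length : Int) < maxsize
  · rw [if_pos h]
    rw [fillstrLoop_eq (maxsize - (string.toList.length : Int)).toNat _ _ rfl]
    rw [PySem.List.slice_zero_start, PySem.List.slice_to _ (by omega)]
    rw [List.take_of_length_le (by simp only [List.length_append, List.length_replicate]; omega)]
  · rw [if_neg h]
    have : (maxsize - (string.toList.length : Int)).toNat = 0 := by omega
    rw [this]
    simp
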